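-- pv_equiv track=rewrite | github.com/Julien-pour/arc_example | others_examples/7b-solved_14b-failed_gen4/1f642eb9/task.py | transform
-- ===== SOURCE A (Python) =====
-- def transform(grid):
--     rows = len(grid)
--     cols = len(grid[0])
--     transformed_grid = [row[:] for row in grid]
--
--     def find_nearest_non_zero(x, y, dx, dy):
--         while 0 <= x < rows and 0 <= y < cols and (grid[x][y] == 0):
--             x += dx
--             y += dy
--         if 0 <= x < rows and 0 <= y < cols:
--             return grid[x][y]
--         return None
--     for i in range(rows):
--         for j in range(cols):
--             if grid[i][j] == 8:
--                 top = find_nearest_non_zero(i - 1, j, -1, 0)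
--                 bottom = find_nearest_non_zero(i + 1, j, 1, 0)
--                 left = find_nearest_non_zero(i, j - 1, 0, -1)
--                 right = find_nearest_non_zero(i, j + 1, 0, 1)
--                 if top and top != 8:
--                     transformed_grid[i][j] = top
--                 elif bottom and bottom != 8:
--                     transformed_grid[i][j] = bottom
--                 elif left and left != 8:
--                     transformed_grid[i][j] = left
--                 elif right and right != 8:
--                     transformed_grid[i][j] = right
--     return transformed_grid
-- ===== SOURCE B (Python) =====
-- def transform(grid):
--     cols = len(grid[0])
--     nz = lambda c, s: c if c != 0 else s
--     left = []
--     for row in grid: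
--         s = None; acc = []
--         for c in row[:cols]:
--             acc.append(s); s = nz(c, s)
--         left.append(acc)
--     right = []
--     for row in grid:
--         s = None; acc = []
--         for c in reversed(row[:cols]):
--             acc.append(s); s = nz(c, s)
--         acc.reverse(); right.append(acc)
--     up = []; state = [None] * cols
--     for row in grid:
--         up.append(state); state = [nz(c, s) for c, s in zip(row, state)]
--     down = []; state = [None] * cols
--     for row in reversed(grid):
--         down.append(state); state = [nz(c, s) for c, s in zip(row, state)]
--     down.reverse()
--     out = []
--     for i, row in enumerate(grid):
--         new = list(row)
--         for j in range(cols):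
--             if row[j] == 8:
--                 for v in (up[i][j], down[i][j], left[i][j], right[i][j]):
--                     if v is not None and v != 8:
--                         new[j] = v
--                         break
--         out.append(new)
--     return out
-- ===== Notes on version B (the rewrite author's own statement) =====
-- stated objective: alternative
-- what changed: A re-scans outward in the four directions from every 8-cell with a while loop; B instead precomputes the nearest non-zero value per direction for all cells with four directional DP sweeps (prefix/suffix scans per row and a per-column running-state array), then fills each 8-cell by one lookup; B trades A's per-8-cell scans for unconditional whole-grid sweeps, so it is asymptotically better when 8-cells are dense but not measurably faster on sparse random grids.
import Mathlib
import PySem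

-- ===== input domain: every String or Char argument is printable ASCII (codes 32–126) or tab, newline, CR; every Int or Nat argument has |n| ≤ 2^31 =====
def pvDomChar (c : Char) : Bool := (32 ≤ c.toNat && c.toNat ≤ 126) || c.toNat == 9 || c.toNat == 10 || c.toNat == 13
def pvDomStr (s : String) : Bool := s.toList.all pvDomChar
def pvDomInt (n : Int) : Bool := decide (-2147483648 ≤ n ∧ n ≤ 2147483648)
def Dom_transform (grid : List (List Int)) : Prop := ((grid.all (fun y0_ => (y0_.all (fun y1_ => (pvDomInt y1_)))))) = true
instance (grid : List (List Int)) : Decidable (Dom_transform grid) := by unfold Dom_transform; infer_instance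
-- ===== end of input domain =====

-- B replaces A's per-8-cell directional while-loop searches by four whole-grid directional
-- DP sweeps that precompute the nearest non-zero value per direction, then one lookup pass
-- (a structurally different algorithm; not claimed faster on the measured inputs).

-- ===== PORT A =====
-- grid[x][y] after the bounds check 0 ≤ x < rows, 0 ≤ y < cols (Pre_ guarantees rows are long enough)
def pvGetCell (g : List (List Int)) (x y : Int) : Int :=
  (PySem.List.pyGet? ((PySem.List.pyGet? g x).getD []) y).getD 0

-- find_nearest_non_zero: the while loop, with fuel (the loop always exits within rows+cols+2 steps)
def pvFnz (g : List (List Int)) (rows cols dx dy : Int) : Nat → Int → Int → Option Int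
  | 0, _, _ => none
  | fuel+1, x, y =>
    if 0 ≤ x ∧ x < rows ∧ 0 ≤ y ∧ y < cols then
      if pvGetCell g x y = 0 then pvFnz g rows cols dx dy fuel (x+dx) (y+dy)
      else some (pvGetCell g x y)
    else none

-- Python truthiness of `top and top != 8` (an Optional[int])
def pvTruthy8 (o : Option Int) : Bool :=
  match o with
  | some t => (t != 0) && (t != 8)
  | none => false

-- transformed_grid[i][j] = v
def pvSetCell (tg : List (List Int)) (i j : Nat) (v : Int) : List (List Int) :=
  tg.set i ((tg.getD i []).set j v)

def transform (grid : List (List Int)) : List (List Int) :=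
  let rows := grid.length
  let cols := (grid.headD []).length   -- grid[0]: IndexError on [], excluded by Pre_
  let fuel := rows + cols + 2
  (List.range rows).foldl (fun tg (i : Nat) =>
    (List.range cols).foldl (fun tg (j : Nat) =>
      if pvGetCell grid i j = 8 then
        let top    := pvFnz grid rows cols (-1) 0 fuel ((i : Int) - 1) (j : Int)
        let bottom := pvFnz grid rows cols 1 0 fuel ((i : Int) + 1) (j : Int)
        let left   := pvFnz grid rows cols 0 (-1) fuel (i : Int) ((j : Int) - 1)
        let right  := pvFnz grid rows cols 0 1 fuel (i : Int) ((j : Int) + 1)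
        if pvTruthy8 top then pvSetCell tg i j (top.getD 0)
        else if pvTruthy8 bottom then pvSetCell tg i j (bottom.getD 0)
        else if pvTruthy8 left then pvSetCell tg i j (left.getD 0)
        else if pvTruthy8 right then pvSetCell tg i j (right.getD 0)
        else tg
      else tg) tg) grid

-- ===== PORT B =====
-- one left-to-right sweep: at each position, the nearest non-zero value seen strictly before it
def altSweep : Option Int → List Int → List (Option Int)
  | _, [] => []
  | s, c :: cs => s :: altSweep (if c ≠ 0 then some c else s) cs

-- state update of the vertical sweep: per column, `c if c != 0 else s` (zip truncates)
def altStep (row : List Int) (st : List (Option Int)) : List (Option Int) :=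
  List.zipWith (fun c s => if c ≠ 0 then some c else s) row st

def altVert : List (Option Int) → List (List Int) → List (List (Option Int))
  | _, [] => []
  | st, row :: rest => st :: altVert (altStep row st) rest

-- first candidate that is not None and ≠ 8, else the original value
def altPick : List (Option Int) → Int → Int
  | [], orig => orig
  | none :: rest, orig => altPick rest orig
  | some v :: rest, orig => if v ≠ 8 then v else altPick rest orig

-- rebuild one row from its four per-direction nearest-non-zero lists (tail beyond cols is copied)
def altCombine : List Int → List (Option Int) → List (Option Int) → List (Option Int) → List (Option Int) → List Int
  | c :: cs, t :: ts, b :: bs, l :: ls, r :: rs =>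
      (if c = 8 then altPick [t, b, l, r] c else c) :: altCombine cs ts bs ls rs
  | row, _, _, _, _ => row

def altRows : List (List Int) → List (List (Option Int)) → List (List (Option Int)) → List (List (Option Int)) → List (List (Option Int)) → List (List Int)
  | row :: g, u :: us, d :: ds, l :: ls, r :: rs => altCombine row u d l r :: altRows g us ds ls rs
  | g, _, _, _, _ => g

def transform_alt (grid : List (List Int)) : List (List Int) :=
  let cols := (grid.headD []).length   -- len(grid[0]): B also raises on [], excluded by Pre_
  let left := grid.map fun row => altSweep none (row.take cols)
  let right := grid.map fun row => (altSweep none (row.take cols).reverse).reverse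
  let up := altVert (List.replicate cols none) grid
  let down := (altVert (List.replicate cols none) grid.reverse).reverse
  altRows grid up down left right

-- ===== PRECONDITION & SPEC =====
-- Pre_ excludes exactly the inputs where A raises: the empty grid (grid[0] → IndexError) and
-- grids with some row shorter than the first row (grid[i][j] → IndexError in the main loop).
def Pre_transform (grid : List (List Int)) : Prop :=
  grid ≠ [] ∧ ∀ row ∈ grid, (grid.headD []).length ≤ row.length

instance (grid : List (List Int)) : Decidable (Pre_transform grid) := by
  unfold Pre_transform; infer_instance

def pvWitness_transform : List (List Int) := [[8, 0], [1, 2]]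

def Spec_transform (grid : List (List Int)) (out : List (List Int)) : Prop := out = transform_alt grid
instance (grid : List (List Int)) (out : List (List Int)) : Decidable (Spec_transform grid out) := by unfold Spec_transform; infer_instance

-- ===== CLAIM (what is proved, stated in full; the proofs are below) =====
def Claim_equal_transform : Prop := ∀ (grid : List (List Int)), Dom_transform grid → Pre_transform grid → Spec_transform grid (transform grid)

-- ===== LEMMAS AND PROOFS =====

-- canonical forms: nearest non-zero = find? over the right slice
def nzfind (l : List Int) : Option Int := l.find? (fun c => c != 0)

def colL (g : List (List Int)) (j : Nat) : List Int := g.map (fun r => r.getD j 0)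

-- A's if-chain as an Option value (mirrors the body of the inner loop of `transform`)
def chooseA (grid : List (List Int)) (i j : Nat) : Option Int :=
  let rows := grid.length
  let cols := (grid.headD []).length
  let fuel := rows + cols + 2
  if pvGetCell grid i j = 8 then
    let top    := pvFnz grid rows cols (-1) 0 fuel ((i : Int) - 1) (j : Int)
    let bottom := pvFnz grid rows cols 1 0 fuel ((i : Int) + 1) (j : Int)
    let left   := pvFnz grid rows cols 0 (-1) fuel (i : Int) ((j : Int) - 1)
    let right  := pvFnz grid rows cols 0 1 fuel (i : Int) ((j : Int) + 1)
    if pvTruthy8 top then some (top.getD 0)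
    else if pvTruthy8 bottom then some (bottom.getD 0)
    else if pvTruthy8 left then some (left.getD 0)
    else if pvTruthy8 right then some (right.getD 0)
    else none
  else none

lemma nzfind_some_ne_zero {l : List Int} {v : Int} (h : nzfind l = some v) : v ≠ 0 := by
  have := List.find?_some h
  simpa using this

lemma pvGetCell_eq (g : List (List Int)) (x y : Nat) (hx : x < g.length)
    (hy : y < (g[x]).length) : pvGetCell g (x : Int) (y : Int) = g[x][y] := by
  simp [pvGetCell, hx, hy]

-- ---------- A side: the four search lemmas ----------

lemma fnz_left (grid : List (List Int)) (cols : Nat)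
    (hcols : ∀ row ∈ grid, cols ≤ row.length) (i : Nat) (hi : i < grid.length) :
    ∀ (f : Nat) (y : Int), y < (cols : Int) → (y + 1).toNat < f →
      pvFnz grid grid.length cols 0 (-1) f (i : Int) y
        = nzfind ((grid[i].take (y + 1).toNat).reverse) := by
  intro f
  induction f with
  | zero => intro y hy hf; exact absurd hf (Nat.not_lt_zero _)
  | succ f ihf =>
    intro y hy hf
    by_cases hy0 : 0 ≤ y
    · obtain ⟨n, rfl⟩ : ∃ n : Nat, y = (n : Int) := ⟨y.toNat, (Int.toNat_of_nonneg hy0).symm⟩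
      have hn : n < cols := by exact_mod_cast hy
      have hrow : cols ≤ grid[i].length := hcols _ (List.getElem_mem hi)
      have hnr : n < grid[i].length := lt_of_lt_of_le hn hrow
      have hcell := pvGetCell_eq grid i n hi hnr
      have hb : (0:Int) ≤ (i:Int) ∧ (i:Int) < (grid.length : Int) ∧ (0:Int) ≤ (n:Int) ∧ (n:Int) < (cols : Int) :=
        ⟨Int.natCast_nonneg _, by exact_mod_cast hi, Int.natCast_nonneg _, by exact_mod_cast hn⟩
      rw [pvFnz, if_pos hb, hcell]
      rw [show ((n:Int) + 1).toNat = n + 1 by omega]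
      rw [List.take_add_one, List.getElem?_eq_getElem hnr]
      simp only [Option.toList_some, List.reverse_append, List.reverse_cons, List.reverse_nil,
        List.nil_append, List.singleton_append, nzfind, List.find?_cons]
      by_cases h0 : grid[i][n] = 0
      · have harg : pvFnz grid grid.length cols 0 (-1) f ((i:Int) + 0) ((n:Int) + -1)
            = nzfind ((grid[i].take ((n:Int) - 1 + 1).toNat).reverse) := by
          rw [show ((i:Int) + 0) = (i:Int) by ring, show ((n:Int) + -1) = (n:Int) - 1 by ring]
          exact ihf ((n:Int) - 1) (by omega) (by omega)
        rw [if_pos h0, harg, show ((n:Int) - 1 + 1).toNat = n by omega,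
          show (grid[i][n] != 0) = false from by simp [h0]]
        rfl
      · rw [if_neg h0, show (grid[i][n] != 0) = true from by simp [h0]]
    · rw [pvFnz, if_neg (by intro h; exact hy0 h.2.2.1)]
      rw [show (y + 1).toNat = 0 by omega]
      simp [nzfind]

lemma fnz_right (grid : List (List Int)) (cols : Nat)
    (hcols : ∀ row ∈ grid, cols ≤ row.length) (i : Nat) (hi : i < grid.length) :
    ∀ (f : Nat) (y : Int), 0 ≤ y → cols - y.toNat < f →
      pvFnz grid grid.length cols 0 1 f (i : Int) y
        = nzfind ((grid[i].take cols).drop y.toNat) := by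
  intro f
  induction f with
  | zero => intro y hy hf; exact absurd hf (Nat.not_lt_zero _)
  | succ f ihf =>
    intro y hy0 hf
    obtain ⟨n, rfl⟩ : ∃ n : Nat, y = (n : Int) := ⟨y.toNat, (Int.toNat_of_nonneg hy0).symm⟩
    have hrow : cols ≤ grid[i].length := hcols _ (List.getElem_mem hi)
    have hlen : (grid[i].take cols).length = cols := by simp; omega
    rw [show ((n:Int)).toNat = n by omega] at *
    by_cases hn : n < cols
    · have hnr : n < grid[i].length := lt_of_lt_of_le hn hrow
      have hcell := pvGetCell_eq grid i n hi hnr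
      have hb : (0:Int) ≤ (i:Int) ∧ (i:Int) < (grid.length : Int) ∧ (0:Int) ≤ (n:Int) ∧ (n:Int) < (cols : Int) :=
        ⟨Int.natCast_nonneg _, by exact_mod_cast hi, Int.natCast_nonneg _, by exact_mod_cast hn⟩
      rw [pvFnz, if_pos hb, hcell]
      rw [List.drop_eq_getElem_cons (by omega : n < (grid[i].take cols).length)]
      have hgt : (grid[i].take cols)[n]'(by omega) = grid[i][n] := List.getElem_take
      rw [hgt]
      simp only [nzfind, List.find?_cons]
      by_cases h0 : grid[i][n] = 0
      · have harg : pvFnz grid grid.length cols 0 1 f ((i:Int) + 0) ((n:Int) + 1)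
            = nzfind ((grid[i].take cols).drop ((n:Int) + 1).toNat) := by
          rw [show ((i:Int) + 0) = (i:Int) by ring]
          exact ihf ((n:Int) + 1) (by omega) (by omega)
        rw [if_pos h0, harg, show ((n:Int) + 1).toNat = n + 1 by omega,
          show (grid[i][n] != 0) = false from by simp [h0]]
        rfl
      · rw [if_neg h0, show (grid[i][n] != 0) = true from by simp [h0]]
    · rw [pvFnz, if_neg (by intro h; exact hn (by exact_mod_cast h.2.2.2))]
      rw [List.drop_eq_nil_of_le (by omega)]
      simp [nzfind]

lemma fnz_up (grid : List (List Int)) (cols : Nat)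
    (hcols : ∀ row ∈ grid, cols ≤ row.length) (j : Nat) (hj : j < cols) :
    ∀ (f : Nat) (x : Int), x < (grid.length : Int) → (x + 1).toNat < f →
      pvFnz grid grid.length cols (-1) 0 f x (j : Int)
        = nzfind (((colL grid j).take (x + 1).toNat).reverse) := by
  intro f
  induction f with
  | zero => intro x hx hf; exact absurd hf (Nat.not_lt_zero _)
  | succ f ihf =>
    intro x hx hf
    by_cases hx0 : 0 ≤ x
    · obtain ⟨n, rfl⟩ : ∃ n : Nat, x = (n : Int) := ⟨x.toNat, (Int.toNat_of_nonneg hx0).symm⟩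
      have hn : n < grid.length := by exact_mod_cast hx
      have hrow : cols ≤ grid[n].length := hcols _ (List.getElem_mem hn)
      have hjr : j < grid[n].length := lt_of_lt_of_le hj hrow
      have hcell := pvGetCell_eq grid n j hn hjr
      have hcol : (colL grid j)[n]'(by simp [colL]; omega) = grid[n][j] := by
        simp [colL, List.getD, List.getElem?_eq_getElem hjr]
      have hb : (0:Int) ≤ (n:Int) ∧ (n:Int) < (grid.length : Int) ∧ (0:Int) ≤ (j:Int) ∧ (j:Int) < (cols : Int) :=
        ⟨Int.natCast_nonneg _, by exact_mod_cast hn, Int.natCast_nonneg _, by exact_mod_cast hj⟩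
      have hnc : n < (colL grid j).length := by simp [colL]; omega
      rw [pvFnz, if_pos hb, hcell]
      rw [show ((n:Int) + 1).toNat = n + 1 by omega]
      rw [List.take_add_one, List.getElem?_eq_getElem hnc, hcol]
      simp only [Option.toList_some, List.reverse_append, List.reverse_cons, List.reverse_nil,
        List.nil_append, List.singleton_append, nzfind, List.find?_cons]
      by_cases h0 : grid[n][j] = 0
      · have harg : pvFnz grid grid.length cols (-1) 0 f ((n:Int) + -1) ((j:Int) + 0)
            = nzfind (((colL grid j).take ((n:Int) - 1 + 1).toNat).reverse) := by
          rw [show ((j:Int) + 0) = (j:Int) by ring, show ((n:Int) + -1) = (n:Int) - 1 by ring]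
          exact ihf ((n:Int) - 1) (by omega) (by omega)
        rw [if_pos h0, harg, show ((n:Int) - 1 + 1).toNat = n by omega,
          show (grid[n][j] != 0) = false from by simp [h0]]
        rfl
      · rw [if_neg h0, show (grid[n][j] != 0) = true from by simp [h0]]
    · rw [pvFnz, if_neg (by intro h; exact hx0 h.1)]
      rw [show (x + 1).toNat = 0 by omega]
      simp [nzfind]

lemma fnz_down (grid : List (List Int)) (cols : Nat)
    (hcols : ∀ row ∈ grid, cols ≤ row.length) (j : Nat) (hj : j < cols) :
    ∀ (f : Nat) (x : Int), 0 ≤ x → grid.length - x.toNat < f →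
      pvFnz grid grid.length cols 1 0 f x (j : Int)
        = nzfind ((colL grid j).drop x.toNat) := by
  intro f
  induction f with
  | zero => intro x hx hf; exact absurd hf (Nat.not_lt_zero _)
  | succ f ihf =>
    intro x hx0 hf
    obtain ⟨n, rfl⟩ : ∃ n : Nat, x = (n : Int) := ⟨x.toNat, (Int.toNat_of_nonneg hx0).symm⟩
    have hcollen : (colL grid j).length = grid.length := by simp [colL]
    rw [show ((n:Int)).toNat = n by omega] at *
    by_cases hn : n < grid.length
    · have hrow : cols ≤ grid[n].length := hcols _ (List.getElem_mem hn)
      have hjr : j < grid[n].length := lt_of_lt_of_le hj hrow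
      have hcell := pvGetCell_eq grid n j hn hjr
      have hnc : n < (colL grid j).length := by omega
      have hcol : (colL grid j)[n]'hnc = grid[n][j] := by
        simp [colL, List.getD, List.getElem?_eq_getElem hjr]
      have hb : (0:Int) ≤ (n:Int) ∧ (n:Int) < (grid.length : Int) ∧ (0:Int) ≤ (j:Int) ∧ (j:Int) < (cols : Int) :=
        ⟨Int.natCast_nonneg _, by exact_mod_cast hn, Int.natCast_nonneg _, by exact_mod_cast hj⟩
      rw [pvFnz, if_pos hb, hcell]
      rw [List.drop_eq_getElem_cons hnc, hcol]
      simp only [nzfind, List.find?_cons]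
      by_cases h0 : grid[n][j] = 0
      · have harg : pvFnz grid grid.length cols 1 0 f ((n:Int) + 1) ((j:Int) + 0)
            = nzfind ((colL grid j).drop ((n:Int) + 1).toNat) := by
          rw [show ((j:Int) + 0) = (j:Int) by ring]
          exact ihf ((n:Int) + 1) (by omega) (by omega)
        rw [if_pos h0, harg, show ((n:Int) + 1).toNat = n + 1 by omega,
          show (grid[n][j] != 0) = false from by simp [h0]]
        rfl
      · rw [if_neg h0, show (grid[n][j] != 0) = true from by simp [h0]]
    · rw [pvFnz, if_neg (by intro h; exact hn (by exact_mod_cast h.2.1))]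
      rw [List.drop_eq_nil_of_le (by omega)]
      simp [nzfind]

-- ---------- A side: the fold of in-place updates, characterized pointwise ----------

-- inner loop over j, for a fixed i, as a function of the row
def rowUpd (grid : List (List Int)) (i : Nat) (n : Nat) (row : List Int) : List Int :=
  (List.range n).foldl (fun row j =>
    match chooseA grid i j with
    | some v => row.set j v
    | none => row) row

lemma rowUpd_succ (grid : List (List Int)) (i n : Nat) (row : List Int) :
    rowUpd grid i (n + 1) row
      = (match chooseA grid i n with
         | some v => (rowUpd grid i n row).set n v
         | none => rowUpd grid i n row) := by
  simp only [rowUpd, List.range_succ, List.foldl_append, List.foldl_cons, List.foldl_nil]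

lemma rowUpd_length (grid : List (List Int)) (i n : Nat) (row : List Int) :
    (rowUpd grid i n row).length = row.length := by
  induction n with
  | zero => rfl
  | succ n ih =>
    rw [rowUpd_succ]
    cases chooseA grid i n <;> simp [ih]

lemma rowUpd_getElem? (grid : List (List Int)) (i n : Nat) (row : List Int) (k : Nat) :
    (rowUpd grid i n row)[k]?
      = if k < n then (row[k]?).map (fun c =>
          match chooseA grid i k with
          | some v => v
          | none => c)
        else row[k]? := by
  induction n with
  | zero => simp [rowUpd]
  | succ n ih =>
    rw [rowUpd_succ]
    rcases hch : chooseA grid i n with _ | v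
    · rw [ih]
      by_cases hk : k < n
      · rw [if_pos hk, if_pos (by omega)]
      · by_cases hk1 : k < n + 1
        · have hkn : k = n := by omega
          subst hkn
          rw [if_neg hk, if_pos hk1, hch]
          cases row[k]? <;> rfl
        · rw [if_neg hk, if_neg hk1]
    · rw [List.getElem?_set, ih, rowUpd_length]
      by_cases hkn : n = k
      · rw [if_pos hkn, if_pos (show k < n + 1 by omega), ← hkn, hch]
        by_cases hlen : n < row.length
        · rw [if_pos hlen, List.getElem?_eq_getElem hlen]
          rfl
        · rw [if_neg hlen, List.getElem?_eq_none (by omega)]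
          rfl
      · rw [if_neg hkn]
        by_cases hk : k < n
        · rw [if_pos hk, if_pos (by omega)]
        · rw [if_neg hk, if_neg (by omega)]

-- the inner fold on the whole grid equals a set of row i to rowUpd of row i
lemma inner_fold_eq (grid : List (List Int)) (i : Nat) (n : Nat) :
    ∀ tg : List (List Int),
      ((List.range n).foldl (fun tg j =>
        match chooseA grid i j with
        | some v => pvSetCell tg i j v
        | none => tg) tg)
      = tg.set i (rowUpd grid i n (tg.getD i [])) := by
  intro tg
  induction n generalizing tg with
  | zero =>
    simp only [List.range_zero, List.foldl_nil, rowUpd, List.foldl_nil]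
    by_cases hi : i < tg.length
    · apply List.ext_getElem?
      intro k
      rw [List.getElem?_set]
      by_cases hik : i = k
      · subst hik
        rw [if_pos rfl, if_pos hi, List.getD, List.getElem?_eq_getElem hi]
        rfl
      · rw [if_neg hik]
    · rw [List.set_eq_of_length_le (by omega)]
  | succ n ih =>
    simp only [List.range_succ, List.foldl_append, List.foldl_cons, List.foldl_nil]
    rw [ih tg, rowUpd_succ]
    rcases hch : chooseA grid i n with _ | v
    · rfl
    · show pvSetCell (tg.set i (rowUpd grid i n (tg.getD i []))) i n v = _
      by_cases hi : i < tg.length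
      · unfold pvSetCell
        rw [List.set_set]
        congr 1
        rw [List.getD, List.getElem?_set, if_pos rfl, if_pos (by simpa using hi)]
        rfl
      · have hts : ∀ X : List Int, tg.set i X = tg :=
          fun X => List.set_eq_of_length_le (by omega)
        unfold pvSetCell
        rw [hts, hts, hts]

-- the body of transform's inner loop IS the match on chooseA
lemma body_eq (grid : List (List Int)) (tg : List (List Int)) (i j : Nat) :
    (if pvGetCell grid i j = 8 then
        let top    := pvFnz grid grid.length (grid.headD []).length (-1) 0 (grid.length + (grid.headD []).length + 2) ((i : Int) - 1) (j : Int)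
        let bottom := pvFnz grid grid.length (grid.headD []).length 1 0 (grid.length + (grid.headD []).length + 2) ((i : Int) + 1) (j : Int)
        let left   := pvFnz grid grid.length (grid.headD []).length 0 (-1) (grid.length + (grid.headD []).length + 2) (i : Int) ((j : Int) - 1)
        let right  := pvFnz grid grid.length (grid.headD []).length 0 1 (grid.length + (grid.headD []).length + 2) (i : Int) ((j : Int) + 1)
        if pvTruthy8 top then pvSetCell tg i j (top.getD 0)
        else if pvTruthy8 bottom then pvSetCell tg i j (bottom.getD 0)
        else if pvTruthy8 left then pvSetCell tg i j (left.getD 0)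
        else if pvTruthy8 right then pvSetCell tg i j (right.getD 0)
        else tg
      else tg)
    = match chooseA grid i j with
      | some v => pvSetCell tg i j v
      | none => tg := by
  unfold chooseA
  dsimp only
  split_ifs <;> rfl

lemma transform_def (grid : List (List Int)) :
    transform grid
      = (List.range grid.length).foldl (fun tg i =>
          (List.range (grid.headD []).length).foldl (fun tg j =>
            match chooseA grid i j with
            | some v => pvSetCell tg i j v
            | none => tg) tg) grid := by
  unfold transform
  dsimp only
  congr 1
  funext tg i
  congr 1
  funext tg j
  exact body_eq grid tg i j

lemma outer_length (grid : List (List Int)) : ∀ (m : Nat),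
    ((List.range m).foldl (fun tg i =>
      tg.set i (rowUpd grid i (grid.headD []).length (tg.getD i []))) grid).length
    = grid.length := by
  intro m
  induction m with
  | zero => rfl
  | succ m ih =>
    rw [List.range_succ, List.foldl_append, List.foldl_cons, List.foldl_nil,
      List.length_set, ih]

lemma outer_getElem? (grid : List (List Int)) : ∀ (m k : Nat),
    ((List.range m).foldl (fun tg i =>
      tg.set i (rowUpd grid i (grid.headD []).length (tg.getD i []))) grid)[k]?
    = if k < m then (grid[k]?).map (rowUpd grid k (grid.headD []).length) else grid[k]? := by
  intro m
  induction m with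
  | zero => intro k; simp
  | succ m ih =>
    intro k
    rw [List.range_succ, List.foldl_append, List.foldl_cons, List.foldl_nil,
      List.getElem?_set]
    by_cases hmk : m = k
    · rw [if_pos hmk, outer_length, ← hmk, if_pos (show m < m + 1 by omega)]
      have hm : ((List.range m).foldl (fun tg i =>
          tg.set i (rowUpd grid i (grid.headD []).length (tg.getD i []))) grid).getD m []
          = grid.getD m [] := by
        rw [List.getD, List.getD, ih, if_neg (by omega)]
      rw [hm]
      by_cases hlen : m < grid.length
      · rw [if_pos hlen, List.getElem?_eq_getElem hlen, List.getD, List.getElem?_eq_getElem hlen]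
        rfl
      · rw [if_neg hlen, List.getElem?_eq_none (by omega)]
        rfl
    · rw [if_neg hmk, ih]
      by_cases hk : k < m
      · rw [if_pos hk, if_pos (by omega)]
      · rw [if_neg hk, if_neg (by omega)]

lemma transform_def_fold (grid : List (List Int)) :
    (List.range grid.length).foldl (fun tg i =>
          (List.range (grid.headD []).length).foldl (fun tg j =>
            match chooseA grid i j with
            | some v => pvSetCell tg i j v
            | none => tg) tg) grid
    = (List.range grid.length).foldl (fun tg i =>
          tg.set i (rowUpd grid i (grid.headD []).length (tg.getD i []))) grid := by
  congr 1
  funext tg i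
  exact inner_fold_eq grid i (grid.headD []).length tg

lemma transform_getElem? (grid : List (List Int)) (k : Nat) :
    (transform grid)[k]?
      = if k < grid.length
        then (grid[k]?).map (rowUpd grid k (grid.headD []).length)
        else grid[k]? := by
  rw [transform_def, transform_def_fold]
  exact outer_getElem? grid grid.length k

-- ---------- B side: sweep lemmas ----------

lemma altSweep_length (s : Option Int) (l : List Int) : (altSweep s l).length = l.length := by
  induction l generalizing s with
  | nil => rfl
  | cons c cs ih => simp [altSweep, ih]

lemma altSweep_getElem? (l : List Int) : ∀ (s : Option Int) (k : Nat), k < l.length →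
    (altSweep s l)[k]? = some ((nzfind ((l.take k).reverse)).or s) := by
  induction l with
  | nil => intro s k h; simp at h
  | cons c cs ih =>
    intro s k h
    cases k with
    | zero => simp [altSweep, nzfind]
    | succ k =>
      have hk : k < cs.length := by simpa using h
      rw [List.take_succ_cons, List.reverse_cons]
      simp only [altSweep, List.getElem?_cons_succ, ih _ _ hk, nzfind, List.find?_append]
      cases hA : List.find? (fun c => c != 0) ((cs.take k).reverse) with
      | some v => simp
      | none =>
        by_cases hc : c = 0 <;> simp [hc]

lemma altVert_length (g : List (List Int)) : ∀ st, (altVert st g).length = g.length := by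
  induction g with
  | nil => intro st; rfl
  | cons row rest ih => intro st; simp [altVert, ih]

lemma altVert_getElem? (g : List (List Int)) : ∀ (st : List (Option Int)) (k : Nat), k < g.length →
    (altVert st g)[k]? = some (List.foldl (fun st row => altStep row st) st (g.take k)) := by
  induction g with
  | nil => intro st k h; simp at h
  | cons row rest ih =>
    intro st k h
    cases k with
    | zero => simp [altVert]
    | succ k =>
      have hk : k < rest.length := by simpa using h
      simp [altVert, ih _ _ hk]

lemma foldl_altStep_length (pre : List (List Int)) : ∀ (st : List (Option Int)),
    (∀ row ∈ pre, st.length ≤ row.length) →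
    (List.foldl (fun st row => altStep row st) st pre).length = st.length := by
  induction pre with
  | nil => intro st _; rfl
  | cons row rest ih =>
    intro st h
    have h1 : st.length ≤ row.length := h row (List.mem_cons_self ..)
    have hst : (altStep row st).length = st.length := by
      simp [altStep]; omega
    simp only [List.foldl_cons]
    rw [ih _ (by intro r hr; rw [hst]; exact h r (List.mem_cons_of_mem _ hr)), hst]

lemma foldl_altStep_getElem? (pre : List (List Int)) : ∀ (st : List (Option Int)) (j : Nat),
    j < st.length → (∀ row ∈ pre, st.length ≤ row.length) →
    (List.foldl (fun st row => altStep row st) st pre)[j]?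
      = some ((nzfind ((pre.map (fun r => r.getD j 0)).reverse)).or (st.getD j none)) := by
  induction pre with
  | nil =>
    intro st j hj _
    simp [nzfind, List.getElem?_eq_getElem hj, List.getD, List.getElem?_eq_getElem]
  | cons row rest ih =>
    intro st j hj h
    have h1 : st.length ≤ row.length := h row (List.mem_cons_self ..)
    have hst : (altStep row st).length = st.length := by simp [altStep]; omega
    have hjr : j < row.length := lt_of_lt_of_le hj h1
    have hget : (altStep row st).getD j none
        = if row.getD j 0 ≠ 0 then some (row.getD j 0) else st.getD j none := by
      simp only [altStep, List.getD, List.getElem?_zipWith,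
        List.getElem?_eq_getElem hjr, List.getElem?_eq_getElem hj]
      simp
    simp only [List.foldl_cons, List.map_cons, List.reverse_cons]
    rw [ih _ _ (by omega) (by intro r hr; rw [hst]; exact h r (List.mem_cons_of_mem _ hr)), hget]
    simp only [nzfind, List.find?_append]
    cases hA : List.find? (fun c => c != 0) ((rest.map (fun r => r.getD j 0)).reverse) with
    | some v => simp
    | none => by_cases hc : row[j]?.getD 0 = 0 <;> simp_all [List.getD]

lemma altCombine_getElem? (t : List (Option Int)) :
    ∀ (row : List Int) (b l r : List (Option Int)) (k : Nat),
    b.length = t.length → l.length = t.length → r.length = t.length → t.length ≤ row.length →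
    (altCombine row t b l r)[k]?
      = if h : k < t.length
        then (row[k]?).map (fun c => if c = 8 then altPick [t[k]?.getD none, b[k]?.getD none, l[k]?.getD none, r[k]?.getD none] c else c)
        else row[k]? := by
  induction t with
  | nil =>
    intro row b l r k hb hl hr ht
    cases b <;> cases l <;> cases r <;> simp_all
    cases row <;> simp [altCombine]
  | cons t0 ts ih =>
    intro row b l r k hb hl hr ht
    cases row with
    | nil => simp at ht
    | cons c cs =>
      cases b with
      | nil => simp at hb
      | cons b0 bs =>
        cases l with
        | nil => simp at hl
        | cons l0 ls =>
          cases r with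
          | nil => simp at hr
          | cons r0 rs =>
            cases k with
            | zero => simp [altCombine]
            | succ k =>
              have := ih cs bs ls rs k (by simpa using hb) (by simpa using hl)
                (by simpa using hr) (by simpa using ht)
              simp only [altCombine, List.getElem?_cons_succ, this, List.length_cons]
              by_cases hk : k < ts.length <;> simp [hk]

lemma altRows_getElem? (g : List (List Int)) :
    ∀ (u d l r : List (List (Option Int))) (k : Nat),
    u.length = g.length → d.length = g.length → l.length = g.length → r.length = g.length →
    (altRows g u d l r)[k]?
      = match g[k]?, u[k]?, d[k]?, l[k]?, r[k]? with
        | some row, some tu, some td, some tl, some tr => some (altCombine row tu td tl tr)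
        | _, _, _, _, _ => g[k]? := by
  induction g with
  | nil =>
    intro u d l r k hu hd hl hr
    cases u <;> cases d <;> cases l <;> cases r <;> simp_all [altRows]
  | cons row g ih =>
    intro u d l r k hu hd hl hr
    cases u with
    | nil => simp at hu
    | cons u0 us =>
      cases d with
      | nil => simp at hd
      | cons d0 ds =>
        cases l with
        | nil => simp at hl
        | cons l0 ls =>
          cases r with
          | nil => simp at hr
          | cons r0 rs =>
            cases k with
            | zero => simp [altRows]
            | succ k =>
              have := ih us ds ls rs k (by simpa using hu) (by simpa using hd)
                (by simpa using hl) (by simpa using hr)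
              simp only [altRows, List.getElem?_cons_succ, this]

-- ---------- the per-cell equality ----------

def chainOf : List (Option Int) → Option Int
  | [] => none
  | o :: rest => if pvTruthy8 o then some (o.getD 0) else chainOf rest

lemma chain_eq_pick (t b l r : Option Int) (c : Int)
    (ht : ∀ v, t = some v → v ≠ 0) (hb : ∀ v, b = some v → v ≠ 0)
    (hl : ∀ v, l = some v → v ≠ 0) (hr : ∀ v, r = some v → v ≠ 0) :
    (match (if pvTruthy8 t then some (t.getD 0)
            else if pvTruthy8 b then some (b.getD 0)
            else if pvTruthy8 l then some (l.getD 0)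
            else if pvTruthy8 r then some (r.getD 0)
            else none) with
     | some v => v
     | none => c)
    = altPick [t, b, l, r] c := by
  have key : ∀ (os : List (Option Int)) (c : Int),
      (∀ o ∈ os, ∀ v, o = some v → v ≠ 0) →
      (match chainOf os with | some v => v | none => c) = altPick os c := by
    intro os
    induction os with
    | nil => intro c _; rfl
    | cons o rest ih =>
      intro c h
      have htl : ∀ o ∈ rest, ∀ v, o = some v → v ≠ 0 :=
        fun o ho => h o (List.mem_cons_of_mem _ ho)
      rcases o with _ | v
      · simpa [chainOf, pvTruthy8, altPick] using ih c htl
      · have hv := h (some v) (List.mem_cons_self ..) v rfl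
        by_cases h8 : v = 8
        · simpa [chainOf, pvTruthy8, h8, altPick] using ih c htl
        · simp [chainOf, pvTruthy8, h8, hv, altPick]
  have hrw : (if pvTruthy8 t then some (t.getD 0)
      else if pvTruthy8 b then some (b.getD 0)
      else if pvTruthy8 l then some (l.getD 0)
      else if pvTruthy8 r then some (r.getD 0)
      else none) = chainOf [t, b, l, r] := rfl
  rw [hrw]
  refine key [t, b, l, r] c ?_
  intro o ho v hov
  simp only [List.mem_cons, List.mem_singleton, List.not_mem_nil, or_false] at ho
  rcases ho with rfl | rfl | rfl | rfl
  · exact ht v hov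
  · exact hb v hov
  · exact hl v hov
  · exact hr v hov


-- ===== VERDICT (by name: the statement is the Claim_ definition above) =====
-- per-cell equality: A's chain value at (i,k) matches B's pick of the four precomputed nearests
lemma cell_eq (grid : List (List Int)) (hlen : ∀ row ∈ grid, (grid.headD []).length ≤ row.length)
    (i k : Nat) (hi : i < grid.length) (hk : k < (grid.headD []).length) :
    (match chooseA grid i k with
     | some v => v
     | none => grid[i][k]'(lt_of_lt_of_le hk (hlen _ (List.getElem_mem hi))))
    = (if grid[i][k]'(lt_of_lt_of_le hk (hlen _ (List.getElem_mem hi))) = 8 then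
        altPick [nzfind (((colL grid k).take i).reverse),
                 nzfind ((colL grid k).drop (i + 1)),
                 nzfind (((grid[i].take k)).reverse),
                 nzfind ((grid[i].take (grid.headD []).length).drop (k + 1))]
          (grid[i][k]'(lt_of_lt_of_le hk (hlen _ (List.getElem_mem hi))))
       else grid[i][k]'(lt_of_lt_of_le hk (hlen _ (List.getElem_mem hi)))) := by
  have hkr : k < grid[i].length := lt_of_lt_of_le hk (hlen _ (List.getElem_mem hi))
  have hcell := pvGetCell_eq grid i k hi hkr
  have htop : pvFnz grid grid.length (grid.headD []).length (-1) 0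
      (grid.length + (grid.headD []).length + 2) ((i : Int) - 1) (k : Int)
      = nzfind (((colL grid k).take i).reverse) := by
    rw [fnz_up grid _ hlen k hk _ ((i : Int) - 1) (by push_cast; omega) (by omega),
      show ((i : Int) - 1 + 1).toNat = i by omega]
  have hbot : pvFnz grid grid.length (grid.headD []).length 1 0
      (grid.length + (grid.headD []).length + 2) ((i : Int) + 1) (k : Int)
      = nzfind ((colL grid k).drop (i + 1)) := by
    rw [fnz_down grid _ hlen k hk _ ((i : Int) + 1) (by omega) (by omega),
      show ((i : Int) + 1).toNat = i + 1 by omega]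
  have hleft : pvFnz grid grid.length (grid.headD []).length 0 (-1)
      (grid.length + (grid.headD []).length + 2) (i : Int) ((k : Int) - 1)
      = nzfind ((grid[i].take k).reverse) := by
    rw [fnz_left grid _ hlen i hi _ ((k : Int) - 1) (by push_cast; omega) (by omega),
      show ((k : Int) - 1 + 1).toNat = k by omega]
  have hright : pvFnz grid grid.length (grid.headD []).length 0 1
      (grid.length + (grid.headD []).length + 2) (i : Int) ((k : Int) + 1)
      = nzfind ((grid[i].take (grid.headD []).length).drop (k + 1)) := by
    rw [fnz_right grid _ hlen i hi _ ((k : Int) + 1) (by omega) (by omega),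
      show ((k : Int) + 1).toNat = k + 1 by omega]
  unfold chooseA
  dsimp only
  rw [hcell, htop, hbot, hleft, hright]
  by_cases h8 : grid[i][k]'hkr = 8
  · rw [if_pos h8, if_pos h8]
    exact chain_eq_pick _ _ _ _ _
      (fun v hv => nzfind_some_ne_zero hv) (fun v hv => nzfind_some_ne_zero hv)
      (fun v hv => nzfind_some_ne_zero hv) (fun v hv => nzfind_some_ne_zero hv)
  · rw [if_neg h8, if_neg h8]

theorem transform_spec : Claim_equal_transform := by
  intro grid _ hpre
  obtain ⟨hne, hlen⟩ := hpre
  unfold Spec_transform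
  have halt : transform_alt grid = altRows grid
      (altVert (List.replicate (grid.headD []).length none) grid)
      ((altVert (List.replicate (grid.headD []).length none) grid.reverse).reverse)
      (grid.map fun row => altSweep none (row.take (grid.headD []).length))
      (grid.map fun row => (altSweep none (row.take (grid.headD []).length).reverse).reverse) := rfl
  apply List.ext_getElem?
  intro i
  rw [transform_getElem?, halt]
  rw [altRows_getElem? grid _ _ _ _ i (altVert_length grid _)
    (by rw [List.length_reverse, altVert_length, List.length_reverse])
    (List.length_map ..) (List.length_map ..)]
  by_cases hi : i < grid.length
  · rw [if_pos hi]
    have hrowlen : (grid.headD []).length ≤ grid[i].length := hlen _ (List.getElem_mem hi)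
    have hu := altVert_getElem? grid (List.replicate (grid.headD []).length none) i hi
    have hd : ((altVert (List.replicate (grid.headD []).length none) grid.reverse).reverse)[i]?
        = some (List.foldl (fun st row => altStep row st)
            (List.replicate (grid.headD []).length none) ((grid.drop (i + 1)).reverse)) := by
      rw [List.getElem?_reverse (by rw [altVert_length, List.length_reverse]; exact hi),
        altVert_length, List.length_reverse]
      rw [altVert_getElem? _ _ _ (by rw [List.length_reverse]; omega)]
      congr 2
      rw [List.take_reverse]
      have hidx : grid.length - (grid.length - 1 - i) = i + 1 := by omega
      rw [hidx]
    have hlm : (grid.map fun row => altSweep none (row.take (grid.headD []).length))[i]?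
        = some (altSweep none (grid[i].take (grid.headD []).length)) := by
      rw [List.getElem?_map, List.getElem?_eq_getElem hi]
      rfl
    have hrm : (grid.map fun row => (altSweep none (row.take (grid.headD []).length).reverse).reverse)[i]?
        = some ((altSweep none (grid[i].take (grid.headD []).length).reverse).reverse) := by
      rw [List.getElem?_map, List.getElem?_eq_getElem hi]
      rfl
    rw [List.getElem?_eq_getElem hi, hu, hd, hlm, hrm]
    show some _ = some _
    congr 1
    -- row-level extensionality
    have hulen : (List.foldl (fun st row => altStep row st)
        (List.replicate (grid.headD []).length none) (grid.take i)).length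
        = (grid.headD []).length := by
      rw [foldl_altStep_length _ _ (by
        intro r hr
        rw [List.length_replicate]
        exact hlen r (List.mem_of_mem_take hr)), List.length_replicate]
    have hdlen : (List.foldl (fun st row => altStep row st)
        (List.replicate (grid.headD []).length none) ((grid.drop (i + 1)).reverse)).length
        = (grid.headD []).length := by
      rw [foldl_altStep_length _ _ (by
        intro r hr
        rw [List.length_replicate]
        exact hlen r (List.mem_of_mem_drop (List.mem_reverse.mp hr))), List.length_replicate]
    have hslen : (altSweep none (grid[i].take (grid.headD []).length)).length
        = (grid.headD []).length := by
      rw [altSweep_length, List.length_take]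
      omega
    have hsrlen : ((altSweep none (grid[i].take (grid.headD []).length).reverse).reverse).length
        = (grid.headD []).length := by
      rw [List.length_reverse, altSweep_length, List.length_reverse, List.length_take]
      omega
    apply List.ext_getElem?
    intro k
    rw [rowUpd_getElem?]
    rw [altCombine_getElem? _ _ _ _ _ k (by rw [hdlen, hulen]) (by rw [hslen, hulen])
      (by rw [hsrlen, hulen]) (by rw [hulen]; exact hrowlen)]
    by_cases hk : k < (grid.headD []).length
    · rw [if_pos hk, dif_pos (by rw [hulen]; exact hk)]
      have hkr : k < grid[i].length := lt_of_lt_of_le hk hrowlen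
      rw [List.getElem?_eq_getElem hkr]
      show some _ = some _
      congr 1
      -- identify the four candidate values
      have hreplD : (List.replicate (grid.headD []).length (none : Option Int)).getD k none = none := by
        rw [List.getD, List.getElem?_replicate]
        split <;> rfl
      have hueq : (List.foldl (fun st row => altStep row st)
          (List.replicate (grid.headD []).length none) (grid.take i))[k]?.getD none
          = nzfind (((colL grid k).take i).reverse) := by
        rw [foldl_altStep_getElem? _ _ k (by rw [List.length_replicate]; exact hk)
          (by intro r hr; rw [List.length_replicate]; exact hlen r (List.mem_of_mem_take hr)),
          hreplD]
        simp only [Option.getD_some, Option.or_none]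
        rw [show (grid.take i).map (fun r => r.getD k 0) = (colL grid k).take i from
          (List.map_take).symm ▸ rfl]
      have hdeq : (List.foldl (fun st row => altStep row st)
          (List.replicate (grid.headD []).length none) ((grid.drop (i + 1)).reverse))[k]?.getD none
          = nzfind ((colL grid k).drop (i + 1)) := by
        rw [foldl_altStep_getElem? _ _ k (by rw [List.length_replicate]; exact hk)
          (by intro r hr; rw [List.length_replicate]
              exact hlen r (List.mem_of_mem_drop (List.mem_reverse.mp hr))),
          hreplD]
        simp only [Option.getD_some, Option.or_none]
        rw [List.map_reverse, List.reverse_reverse, List.map_drop]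
        rfl
      have hleq : (altSweep none (grid[i].take (grid.headD []).length))[k]?.getD none
          = nzfind ((grid[i].take k).reverse) := by
        rw [altSweep_getElem? _ _ k (by rw [List.length_take]; omega)]
        simp only [Option.getD_some, Option.or_none]
        rw [List.take_take, Nat.min_eq_left (by omega)]
      have hreq : ((altSweep none (grid[i].take (grid.headD []).length).reverse).reverse)[k]?.getD none
          = nzfind ((grid[i].take (grid.headD []).length).drop (k + 1)) := by
        have hL : (altSweep none (grid[i].take (grid.headD []).length).reverse).length
            = (grid.headD []).length := by
          rw [altSweep_length, List.length_reverse, List.length_take]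
          omega
        rw [List.getElem?_reverse (by rw [hL]; exact hk), hL]
        rw [altSweep_getElem? _ _ _ (by rw [List.length_reverse, List.length_take]; omega)]
        simp only [Option.getD_some, Option.or_none]
        rw [List.take_reverse, List.reverse_reverse]
        congr 2
        rw [List.length_take]
        omega
      rw [hueq, hdeq, hleq, hreq]
      have := cell_eq grid hlen i k hi hk
      simpa using this
    · rw [if_neg hk, dif_neg (by rw [hulen]; exact hk)]
  · rw [if_neg hi]
    have hnone : grid[i]? = none := List.getElem?_eq_none (by omega)
    rw [hnone]
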